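-- pv_equiv track=rewrite | github.com/kevinshenyang07/Data-Structures-and-Algorithms | algorithms/data_structure_related/stack.py | next_greater_element_3
-- ===== SOURCE A (Python) =====
-- def next_greater_element_3(n):
--     # similar to next permutation
--     digits = [d for d in str(n)]
--
--     # 1. from right to left find the digit that is not greater than its next digit
--     i = len(digits) - 1
--     while i > 0 and digits[i-1] >= digits[i]:
--         i -= 1
--
--     if i == 0:
--         return -1
--
--     # 2. find the smallest digit that is greater than digits[i-1], then swap
--     # i is now the start of dereasing sequence
--     j = i
--     while j < len(digits) and digits[i-1] < digits[j]:
--         j += 1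
--     digits[i-1], digits[j-1] = digits[j-1], digits[i-1]  # digits[j-1] is the target digit
--
--     # 3. reverse the new decreasing sequence
--     j = len(digits) - 1
--     while i < j:
--         digits[i], digits[j] = digits[j], digits[i]
--         i += 1
--         j -= 1
--
--     val = int(''.join(digits))
--     return val if val <= 2 ** 31 - 1 else -1
-- ===== SOURCE B (Python) =====
-- def next_greater_element_3(n):
--     s = str(n)
--     # every way to put a larger digit from position q at position p (prefix kept,
--     # the rest sorted ascending); the answer is the lexicographic minimum of these
--     cands = [s[:p] + s[q] + ''.join(sorted(s[p + 1:q] + s[p] + s[q + 1:]))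
--              for p in range(len(s)) for q in range(p + 1, len(s)) if s[q] > s[p]]
--     if not cands:
--         return -1
--     val = int(min(cands))
--     return val if val <= 2 ** 31 - 1 else -1
-- ===== Notes on version B (the rewrite author's own statement) =====
-- stated objective: alternative
-- what changed: A's single backward scan with in-place pivot swap and suffix reversal (next permutation) is replaced by exhaustive search: enumerate every candidate 'keep prefix, put a larger digit s[q] at position p, sort the rest ascending' for all index pairs p<q, and return the lexicographic minimum of that candidate list.
import Mathlib
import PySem

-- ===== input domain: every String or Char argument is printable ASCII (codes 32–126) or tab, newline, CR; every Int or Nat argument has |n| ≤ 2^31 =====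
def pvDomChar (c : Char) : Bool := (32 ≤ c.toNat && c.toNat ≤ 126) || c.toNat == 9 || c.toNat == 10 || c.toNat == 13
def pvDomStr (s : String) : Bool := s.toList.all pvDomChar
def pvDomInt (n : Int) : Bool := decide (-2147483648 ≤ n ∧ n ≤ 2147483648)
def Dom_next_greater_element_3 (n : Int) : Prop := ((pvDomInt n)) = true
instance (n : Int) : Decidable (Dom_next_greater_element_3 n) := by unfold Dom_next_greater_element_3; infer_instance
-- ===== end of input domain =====

-- B replaces A's single backward scan with in-place swap and suffix reversal (next permutation)
-- by exhaustive search: it enumerates every candidate "keep the prefix, put the larger digit s[q]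
-- at position p, sort the rest ascending" over all index pairs p < q and takes the lexicographic
-- minimum; objective: alternative. Same return value wherever A returns (Pre_ excludes only
-- inputs where both Pythons raise ValueError).

-- ===== PORT A =====
-- while i > 0 and digits[i-1] >= digits[i]: i -= 1
def ngeStep1 (digits : List Char) (i : Nat) : Nat :=
  if 0 < i ∧ digits.getD i ' ' ≤ digits.getD (i - 1) ' ' then ngeStep1 digits (i - 1) else i
termination_by i
decreasing_by omega

-- while j < len(digits) and digits[i-1] < digits[j]: j += 1
def ngeStep2 (digits : List Char) (i j : Nat) : Nat :=
  if j < digits.length ∧ digits.getD (i - 1) ' ' < digits.getD j ' ' then ngeStep2 digits i (j + 1)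
  else j
termination_by digits.length - j
decreasing_by omega

-- while i < j: digits[i], digits[j] = digits[j], digits[i]; i += 1; j -= 1
def ngeStep3 (digits : List Char) (i j : Nat) : List Char :=
  if i < j then
    ngeStep3 ((digits.set i (digits.getD j ' ')).set j (digits.getD i ' ')) (i + 1) (j - 1)
  else digits
termination_by j - i
decreasing_by omega

def next_greater_element_3 (n : Int) : Int :=
  let digits := PySem.Int.toChars n              -- [d for d in str(n)]
  let i := ngeStep1 digits (digits.length - 1)
  if i = 0 then -1
  else
    let j := ngeStep2 digits i i
    -- digits[i-1], digits[j-1] = digits[j-1], digits[i-1]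
    let d2 := (digits.set (i - 1) (digits.getD (j - 1) ' ')).set (j - 1) (digits.getD (i - 1) ' ')
    let d3 := ngeStep3 d2 i (d2.length - 1)
    match PySem.Int.ofChars? d3 with             -- val = int(''.join(digits)); on '-' inside, Python
    | some val => if val ≤ 2 ^ 31 - 1 then val else -1
    | none => -1                                 -- raises ValueError: outside Pre_, value immaterial

-- ===== PORT B =====
-- s[:p] + s[q] + ''.join(sorted(s[p + 1:q] + s[p] + s[q + 1:]))
def ngeCand (s : List Char) (p q : Int) : List Char :=
  PySem.List.slice s none (some p) ++
    PySem.List.pyGetD s q ' ' ::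
      PySem.List.sorted (PySem.List.slice s (some (p + 1)) (some q) ++
        PySem.List.pyGetD s p ' ' :: PySem.List.slice s (some (q + 1)) none) (fun c => c) false

-- [... for p in range(len(s)) for q in range(p + 1, len(s)) if s[q] > s[p]]
def ngeCandList (s : List Char) : List (List Char) :=
  (PySem.List.pyRange 0 (PySem.List.len s) 1).flatMap (fun p =>
    ((PySem.List.pyRange (p + 1) (PySem.List.len s) 1).filter
      (fun q => decide (PySem.List.pyGetD s p ' ' < PySem.List.pyGetD s q ' '))).map
      (fun q => ngeCand s p q))

def next_greater_element_3_alt (n : Int) : Int :=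
  let s := PySem.Int.toChars n                   -- s = str(n), handled as its character list
  let cands := ngeCandList s
  if cands = [] then -1
  else
    match PySem.List.min? cands (fun c => c) with  -- min(cands): Python's str < is lex on chars
    | some m =>
      match PySem.Int.ofChars? m with            -- val = int(min(cands))
      | some val => if val ≤ 2 ^ 31 - 1 then val else -1
      | none => -1                               -- ValueError (outside Pre_)
    | none => -1                                 -- unreachable (cands ≠ [] here)

-- ===== PRECONDITION & SPEC =====
-- Pre_ excludes exactly the inputs where Python A raises ValueError (int() applied to characters
-- containing '-'): the negative n whose digit part is non-increasing; B raises ValueError there too.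
def Pre_next_greater_element_3 (n : Int) : Prop :=
  0 ≤ n ∨ ¬ ((PySem.Int.toChars n).drop 1).Pairwise (fun a b => b ≤ a)
instance (n : Int) : Decidable (Pre_next_greater_element_3 n) := by
  unfold Pre_next_greater_element_3; infer_instance
def pvWitness_next_greater_element_3 : Int := 12

def Spec_next_greater_element_3 (n : Int) (out : Int) : Prop := out = next_greater_element_3_alt n
instance (n : Int) (out : Int) : Decidable (Spec_next_greater_element_3 n out) := by
  unfold Spec_next_greater_element_3; infer_instance

-- ===== CLAIM (what is proved, stated in full; the proofs are below) =====
def Claim_equal_next_greater_element_3 : Prop := ∀ (n : Int), Dom_next_greater_element_3 n → Pre_next_greater_element_3 n → Spec_next_greater_element_3 n (next_greater_element_3 n)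


-- ===== LEMMAS AND PROOFS =====

-- ---- small list helpers ----
-- value at / overwrite of the position right after a prefix
lemma pv_getD_mid (A R : List Char) (x d : Char) : (A ++ x :: R).getD A.length d = x := by
  rw [List.getD_append_right _ _ _ _ (le_refl _), Nat.sub_self]; rfl

lemma pv_set_mid (A R : List Char) (x y : Char) : (A ++ x :: R).set A.length y = A ++ y :: R := by
  rw [List.set_append]; simp

lemma pv_set_mid' (A R : List Char) (x y : Char) (n : Nat) (hn : n = A.length) :
    (A ++ x :: R).set n y = A ++ y :: R := by
  rw [hn, pv_set_mid]

-- lists of length ≤ 1 are vacuously pairwise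
lemma pv_pairwise_short {l : List Char} (h : l.length ≤ 1) :
    l.Pairwise (fun a b => b ≤ a) := by
  match l, h with
  | [], _ => exact List.Pairwise.nil
  | [x], _ => simp

-- overwriting index k is a permutation of cons-onto-eraseIdx
lemma pv_perm_set (l : List Char) (k : Nat) (x : Char) (h : k < l.length) :
    (l.set k x).Perm (x :: l.eraseIdx k) := by
  rw [List.set_eq_take_cons_drop x h, List.eraseIdx_eq_take_drop_succ]
  exact List.perm_middle

-- removing index k is a permutation of erasing the value found there
lemma pv_eraseIdx_perm_erase (l : List Char) (k : Nat) (h : k < l.length) :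
    (l.eraseIdx k).Perm (l.erase l[k]) := by
  rw [List.perm_iff_count]
  intro c
  have hl : List.count c l =
      List.count c (l.take k) + List.count c (l.drop (k + 1)) +
        (if l[k] == c then 1 else 0) := by
    conv_lhs => rw [← List.take_append_drop k l, List.drop_eq_getElem_cons h]
    rw [List.count_append, List.count_cons]
    omega
  have h1 : List.count c (l.eraseIdx k) =
      List.count c (l.take k) + List.count c (l.drop (k + 1)) := by
    rw [List.eraseIdx_eq_take_drop_succ, List.count_append]
  have h2 : List.count c (l.erase l[k]) =
      List.count c l - if l[k] == c then 1 else 0 := List.count_erase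
  by_cases hc : l[k] = c
  · simp only [hc, beq_self_eq_true, if_pos] at *
    omega
  · have : (l[k] == c) = false := beq_false_of_ne hc
    simp only [this] at *
    omega

-- splitting a drop at a marked position
lemma pv_drop_split (ds : List Char) (a t : Nat) (h : a + t < ds.length) :
    ds.drop a = (ds.drop a).take t ++ ds.getD (a + t) ' ' :: ds.drop (a + t + 1) := by
  conv_lhs => rw [← List.take_append_drop t (ds.drop a)]
  congr 1
  rw [List.drop_drop, List.drop_eq_getElem_cons h,
      List.getD_eq_getElem ds ' ' h]

-- splitting a take at an interior marked position
lemma pv_take_split (ds : List Char) (p m : Nat) (hp : p < m) (hpl : p < ds.length) :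
    ds.take m = ds.take p ++ ds.getD p ' ' :: (ds.drop (p + 1)).take (m - (p + 1)) := by
  conv_lhs => rw [← List.take_append_drop p (ds.take m)]
  rw [List.take_take, min_eq_left (le_of_lt hp), List.drop_take]
  congr 1
  rw [List.drop_eq_getElem_cons hpl, List.getD_eq_getElem ds ' ' hpl,
      show m - p = (m - (p + 1)) + 1 by omega, List.take_succ_cons]

-- lexicographic comparison decided right after a common prefix
lemma pv_lex_of_prefix (A u v : List Char) (a b : Char) (h : a < b) :
    (A ++ a :: u) < (A ++ b :: v) :=
  List.append_left_lt (List.cons_lt_cons_iff.mpr (Or.inl h))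

-- ---- loop 1: the scan for the pivot ----
lemma pv_step1_le (ds : List Char) : ∀ i, ngeStep1 ds i ≤ i := by
  refine ngeStep1.induct ds (fun i => ngeStep1 ds i ≤ i) ?_ ?_
  · intro x hx ih; rw [ngeStep1, if_pos hx]; omega
  · intro x hx; rw [ngeStep1, if_neg hx]

lemma pv_step1_spec (ds : List Char) : ∀ i, i < ds.length →
    (ds.drop i).Pairwise (fun a b => b ≤ a) →
    (ds.drop (ngeStep1 ds i)).Pairwise (fun a b => b ≤ a) ∧
    (0 < ngeStep1 ds i → ds.getD (ngeStep1 ds i - 1) ' ' < ds.getD (ngeStep1 ds i) ' ') := by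
  refine ngeStep1.induct ds (fun i => i < ds.length →
    (ds.drop i).Pairwise (fun a b => b ≤ a) →
    (ds.drop (ngeStep1 ds i)).Pairwise (fun a b => b ≤ a) ∧
    (0 < ngeStep1 ds i → ds.getD (ngeStep1 ds i - 1) ' ' < ds.getD (ngeStep1 ds i) ' ')) ?_ ?_
  · intro x hx ih hlen hpw
    rw [ngeStep1, if_pos hx]
    refine ih (by omega) ?_
    have hx1 : x - 1 < ds.length := by omega
    have hxx : x < ds.length := hlen
    have h10 : x - 1 + 1 = x := by omega
    have hdrop : ds.drop (x - 1) = ds[x - 1] :: ds.drop x := by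
      rw [List.drop_eq_getElem_cons hx1, h10]
    rw [hdrop]
    refine List.Pairwise.cons ?_ hpw
    intro b hb
    have hxle : ds[x] ≤ ds[x - 1] := by
      have h2 := hx.2
      rwa [List.getD_eq_getElem ds ' ' hxx, List.getD_eq_getElem ds ' ' hx1] at h2
    have hdropx : ds.drop x = ds[x] :: ds.drop (x + 1) := List.drop_eq_getElem_cons hxx
    rw [hdropx] at hb hpw
    rcases List.mem_cons.mp hb with hb | hb
    · subst hb; exact hxle
    · exact le_trans ((List.pairwise_cons.mp hpw).1 b hb) hxle
  · intro x hx hlen hpw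
    rw [ngeStep1, if_neg hx]
    refine ⟨hpw, ?_⟩
    intro h0
    rcases not_and_or.mp hx with h | h
    · omega
    · exact lt_of_not_ge h

-- ---- loop 2: the scan for the successor digit ----
lemma pv_step2_spec (ds : List Char) (i : Nat) : ∀ j,
    (∀ k, i ≤ k → k < j → ds.getD (i - 1) ' ' < ds.getD k ' ') → j ≤ ds.length →
    j ≤ ngeStep2 ds i j ∧ ngeStep2 ds i j ≤ ds.length ∧
    (∀ k, i ≤ k → k < ngeStep2 ds i j → ds.getD (i - 1) ' ' < ds.getD k ' ') ∧
    (ngeStep2 ds i j < ds.length → ds.getD (ngeStep2 ds i j) ' ' ≤ ds.getD (i - 1) ' ') := by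
  refine ngeStep2.induct ds i (fun j =>
    (∀ k, i ≤ k → k < j → ds.getD (i - 1) ' ' < ds.getD k ' ') → j ≤ ds.length →
    j ≤ ngeStep2 ds i j ∧ ngeStep2 ds i j ≤ ds.length ∧
    (∀ k, i ≤ k → k < ngeStep2 ds i j → ds.getD (i - 1) ' ' < ds.getD k ' ') ∧
    (ngeStep2 ds i j < ds.length → ds.getD (ngeStep2 ds i j) ' ' ≤ ds.getD (i - 1) ' ')) ?_ ?_
  · intro x hx ih hpre hle
    rw [ngeStep2, if_pos hx]
    have hpre' : ∀ k, i ≤ k → k < x + 1 → ds.getD (i - 1) ' ' < ds.getD k ' ' := by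
      intro k hik hk
      by_cases hkx : k = x
      · subst hkx; exact hx.2
      · exact hpre k hik (by omega)
    have := ih hpre' (by omega)
    exact ⟨by omega, this.2.1, this.2.2.1, this.2.2.2⟩
  · intro x hx hpre hle
    rw [ngeStep2, if_neg hx]
    refine ⟨le_refl _, hle, hpre, ?_⟩
    intro hxlen
    rcases not_and_or.mp hx with h | h
    · omega
    · exact le_of_not_gt h

-- ---- loop 3: in-place reversal of the suffix ----
lemma pv_step3_core : ∀ (len : Nat) (M A B : List Char) (x y : Char), M.length = len →
    ngeStep3 (A ++ x :: M ++ y :: B) A.length (A.length + M.length + 1) =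
      A ++ y :: M.reverse ++ x :: B := by
  intro len
  induction len using Nat.strong_induction_on with
  | _ len ih =>
    intro M A B x y hlen
    rw [ngeStep3]
    have hguard : A.length < A.length + M.length + 1 := by omega
    rw [if_pos hguard]
    have hassoc : A ++ x :: M ++ y :: B = A ++ x :: (M ++ y :: B) := by simp
    have hget_i : (A ++ x :: M ++ y :: B).getD A.length ' ' = x := by
      rw [hassoc]; exact pv_getD_mid A _ x ' '
    have hlen2 : A.length + M.length + 1 = (A ++ x :: M).length := by simp; omega
    have hassoc2 : A ++ x :: M ++ y :: B = (A ++ x :: M) ++ y :: B := by simp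
    have hget_j : (A ++ x :: M ++ y :: B).getD (A.length + M.length + 1) ' ' = y := by
      rw [hassoc2, hlen2]; exact pv_getD_mid (A ++ x :: M) B y ' '
    rw [hget_i, hget_j]
    have hset1 : (A ++ x :: M ++ y :: B).set A.length y = A ++ y :: M ++ y :: B := by
      rw [hassoc, pv_set_mid]; simp
    rw [hset1]
    have hset2 : (A ++ y :: M ++ y :: B).set (A.length + M.length + 1) x =
        A ++ y :: M ++ x :: B := by
      have h1 : A ++ y :: M ++ y :: B = (A ++ y :: M) ++ y :: B := by simp
      have h2 : A ++ y :: M ++ x :: B = (A ++ y :: M) ++ x :: B := by simp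
      have h3 : A.length + M.length + 1 = (A ++ y :: M).length := by simp; omega
      rw [h1, h2, h3, pv_set_mid]
    rw [hset2]
    match M, hlen with
    | [], hlen =>
      rw [ngeStep3, if_neg (by simp)]
      simp
    | m :: M', hlen =>
      rcases List.eq_nil_or_concat M' with hM' | ⟨M'', m2, hM'⟩
      · subst hM'
        rw [show A.length + (m :: ([] : List Char)).length + 1 - 1 = A.length + 1 by
              simp, ngeStep3, if_neg (by omega)]
        simp
      · rw [List.concat_eq_append] at hM'
        subst hM'
        have hrec : A ++ y :: m :: (M'' ++ [m2]) ++ x :: B =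
            (A ++ [y]) ++ m :: M'' ++ m2 :: (x :: B) := by simp
        have hidx2 : A.length + (m :: (M'' ++ [m2])).length + 1 - 1 =
            (A ++ [y]).length + M''.length + 1 := by simp; omega
        have hlA : A.length + 1 = (A ++ [y]).length := by simp
        rw [hrec, hidx2, hlA,
            ih M''.length (by simp at hlen ⊢; omega) M'' (A ++ [y]) (x :: B) m m2 rfl]
        simp
-- every in-bounds call with j = length - 1 reverses the suffix that starts at i
lemma pv_step3_rev (P T : List Char) (hT : T ≠ []) :
    ngeStep3 (P ++ T) P.length (P.length + T.length - 1) = P ++ T.reverse := by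
  match T, hT with
  | [t], _ =>
    rw [ngeStep3, if_neg (by simp)]
    simp
  | t :: t2 :: T', _ =>
    rcases List.eq_nil_or_concat (t2 :: T') with h | ⟨M, tl, hM⟩
    · simp at h
    · rw [List.concat_eq_append] at hM
      rw [hM]
      have h1 : P ++ t :: (M ++ [tl]) = P ++ t :: M ++ tl :: [] := by simp
      have h2 : P.length + (t :: (M ++ [tl])).length - 1 = P.length + M.length + 1 := by
        simp; omega
      rw [h1, h2, pv_step3_core M.length M P [] t tl rfl]
      simp

-- drop-suffix non-increasingness, phrased on total getD access
lemma pv_drop_pairwise_getD (ds : List Char) (i0 : Nat)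
    (hpw : (ds.drop i0).Pairwise (fun a b => b ≤ a)) :
    ∀ u v, i0 ≤ u → u < v → v < ds.length → ds.getD v ' ' ≤ ds.getD u ' ' := by
  intro u v hu huv hv
  have h1 : u - i0 < (ds.drop i0).length := by rw [List.length_drop]; omega
  have h2 : v - i0 < (ds.drop i0).length := by rw [List.length_drop]; omega
  have h3 := (List.pairwise_iff_getElem.mp hpw) (u - i0) (v - i0) h1 h2 (by omega)
  rw [List.getElem_drop, List.getElem_drop] at h3
  rw [List.getD_eq_getElem ds ' ' (show v < ds.length by omega),
      List.getD_eq_getElem ds ' ' (show u < ds.length by omega)]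
  have e1 : i0 + (u - i0) = u := by omega
  have e2 : i0 + (v - i0) = v := by omega
  simp only [e1, e2] at h3
  exact h3

-- an element of the dropped suffix, as total getD access
lemma pv_getElem_drop' (ds : List Char) (i0 q : Nat) (hq : q < (ds.drop i0).length) :
    (ds.drop i0)[q] = ds.getD (i0 + q) ' ' := by
  rw [List.getElem_drop,
      List.getD_eq_getElem ds ' ' (by rw [List.length_drop] at hq; omega)]

-- Python's simultaneous swap of positions u < v, decomposed around position u
lemma pv_swap_decomp (ds : List Char) (u v : Nat) (huv : u < v) (hvL : v < ds.length) :
    (ds.set u (ds.getD v ' ')).set v (ds.getD u ' ') =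
      ds.take u ++ ds.getD v ' ' :: ((ds.drop (u + 1)).set (v - (u + 1)) (ds.getD u ' ')) := by
  have huL : u < ds.length := by omega
  set X := ds.getD v ' ' with hX
  set Y := ds.getD u ' ' with hY
  have hsplit : ds = ds.take u ++ Y :: ds.drop (u + 1) := by
    conv_lhs => rw [← List.take_append_drop u ds]
    congr 1
    rw [List.drop_eq_getElem_cons huL, hY, List.getD_eq_getElem ds ' ' huL]
  have hPlen : (ds.take u).length = u := by rw [List.length_take]; omega
  have hs1 : ds.set u X = ds.take u ++ X :: ds.drop (u + 1) := by
    conv_lhs => rw [hsplit]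
    exact pv_set_mid' (ds.take u) (ds.drop (u + 1)) Y X u hPlen.symm
  rw [hs1,
      show ds.take u ++ X :: ds.drop (u + 1) = (ds.take u ++ [X]) ++ ds.drop (u + 1) by simp,
      List.set_append, if_neg (by simp [hPlen]; omega),
      show v - (ds.take u ++ [X]).length = v - (u + 1) by simp [hPlen]]
  simp

-- in-place reversal of everything after a prefix-plus-one-element
lemma pv_rev_decomp (P T : List Char) (x : Char) (hT : T ≠ []) (i : Nat)
    (hi : i = P.length + 1) :
    ngeStep3 (P ++ x :: T) i ((P ++ x :: T).length - 1) = P ++ x :: T.reverse := by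
  rw [show P ++ x :: T = (P ++ [x]) ++ T by simp, hi,
      show P.length + 1 = (P ++ [x]).length by simp,
      show ((P ++ [x]) ++ T).length - 1 = (P ++ [x]).length + T.length - 1 by simp,
      pv_step3_rev _ _ hT]
  simp

-- A's swapped suffix is non-increasing
lemma pv_T1_pairwise (ds : List Char) (i0 j : Nat)
    (hij : i0 < j) (hjL : j ≤ ds.length)
    (hgt : ∀ k, i0 ≤ k → k < j → ds.getD (i0 - 1) ' ' < ds.getD k ' ')
    (hstop : j < ds.length → ds.getD j ' ' ≤ ds.getD (i0 - 1) ' ')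
    (hpwD : ∀ u v, i0 ≤ u → u < v → v < ds.length → ds.getD v ' ' ≤ ds.getD u ' ') :
    ((ds.drop i0).set (j - 1 - i0) (ds.getD (i0 - 1) ' ')).Pairwise (fun a b => b ≤ a) := by
  rw [List.pairwise_iff_getElem]
  intro p q hp hq hpq
  have hp' : p < (ds.drop i0).length := by rw [List.length_set] at hp; exact hp
  have hq' : q < (ds.drop i0).length := by rw [List.length_set] at hq; exact hq
  have hpL : i0 + p < ds.length := by rw [List.length_drop] at hp'; omega
  have hqL : i0 + q < ds.length := by rw [List.length_drop] at hq'; omega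
  rw [List.getElem_set, List.getElem_set, pv_getElem_drop' ds i0 p hp',
      pv_getElem_drop' ds i0 q hq']
  by_cases hkp : j - 1 - i0 = p
  · rw [if_pos hkp, if_neg (by omega)]
    have hjq : j ≤ i0 + q := by omega
    have hja : ds.getD j ' ' ≤ ds.getD (i0 - 1) ' ' := hstop (by omega)
    rcases lt_or_eq_of_le hjq with hlt | heq
    · exact le_trans (hpwD j (i0 + q) (by omega) hlt hqL) hja
    · rw [heq] at hja
      exact hja
  · rw [if_neg hkp]
    by_cases hkq : j - 1 - i0 = q
    · rw [if_pos hkq]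
      exact le_of_lt (hgt (i0 + p) (by omega) (by omega))
    · rw [if_neg hkq]
      exact hpwD (i0 + p) (i0 + q) (by omega) (by omega) hqL

-- ---- B's candidate list, on Nat indices ----
-- the candidate of index pair (p, q), with the Python slices resolved to take/drop
def pvCand (ds : List Char) (p q : Nat) : List Char :=
  ds.take p ++ ds.getD q ' ' ::
    PySem.List.sorted ((ds.drop (p + 1)).take (q - (p + 1)) ++ ds.getD p ' ' :: ds.drop (q + 1))
      (fun c => c) false

lemma pv_ngeCand_natCast (s : List Char) (p q : Nat) :
    ngeCand s (p : Int) (q : Int) = pvCand s p q := by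
  unfold ngeCand pvCand
  rw [PySem.List.slice_to_natCast, PySem.List.pyGetD_natCast, PySem.List.pyGetD_natCast,
      show ((p : Int) + 1) = ((p + 1 : Nat) : Int) by push_cast; ring,
      show ((q : Int) + 1) = ((q + 1 : Nat) : Int) by push_cast; ring,
      PySem.List.slice_natCast, PySem.List.slice_from_natCast]

lemma pv_mem_cands (s : List Char) (C : List Char) :
    C ∈ ngeCandList s ↔ ∃ p q : Nat, p < q ∧ q < s.length ∧
      s.getD p ' ' < s.getD q ' ' ∧ C = pvCand s p q := by
  unfold ngeCandList
  rw [PySem.List.len_eq, PySem.List.pyRange_zero_natCast]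
  simp only [List.mem_flatMap, List.mem_map, List.mem_filter, List.mem_range,
    PySem.List.mem_pyRange_one, decide_eq_true_eq]
  constructor
  · rintro ⟨pi, ⟨p, hp, rfl⟩, q, ⟨⟨hq1, hq2⟩, hqgt⟩, rfl⟩
    have hq0 : 0 ≤ q := by omega
    have hqe : q = ((q.toNat : Nat) : Int) := by omega
    rw [hqe] at hqgt ⊢
    rw [PySem.List.pyGetD_natCast, PySem.List.pyGetD_natCast] at hqgt
    exact ⟨p, q.toNat, by omega, by omega, hqgt, pv_ngeCand_natCast s p q.toNat⟩
  · rintro ⟨p, q, hpq, hql, hgt, rfl⟩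
    refine ⟨(p : Int), ⟨p, by omega, rfl⟩, (q : Int), ⟨⟨by omega, by omega⟩, ?_⟩,
      pv_ngeCand_natCast s p q⟩
    rw [PySem.List.pyGetD_natCast, PySem.List.pyGetD_natCast]
    exact hgt

-- ---- the two ports agree on every character list ----
lemma pv_main (ds : List Char) :
    (let digits := ds
     let i := ngeStep1 digits (digits.length - 1)
     if i = 0 then (-1 : Int)
     else
       let j := ngeStep2 digits i i
       let d2 := (digits.set (i - 1) (digits.getD (j - 1) ' ')).set (j - 1)
         (digits.getD (i - 1) ' ')
       let d3 := ngeStep3 d2 i (d2.length - 1)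
       match PySem.Int.ofChars? d3 with
       | some val => if val ≤ 2 ^ 31 - 1 then val else -1
       | none => -1) =
    (let s := ds
     let cands := ngeCandList s
     if cands = [] then (-1 : Int)
     else
       match PySem.List.min? cands (fun c => c) with
       | some m =>
         match PySem.Int.ofChars? m with
         | some val => if val ≤ 2 ^ 31 - 1 then val else -1
         | none => -1
       | none => -1) := by
  simp only []
  have hi0le : ngeStep1 ds (ds.length - 1) ≤ ds.length - 1 := pv_step1_le ds (ds.length - 1)
  generalize hi0 : ngeStep1 ds (ds.length - 1) = i0
  rw [hi0] at hi0le
  by_cases h0 : i0 = 0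
  -- ======== no pivot: both return -1 ========
  · rw [if_pos h0]
    have hnil : ngeCandList ds = [] := by
      rw [List.eq_nil_iff_forall_not_mem]
      intro C hC
      obtain ⟨p, q, hpq, hql, hlt, _⟩ := (pv_mem_cands ds C).mp hC
      rcases Nat.eq_zero_or_pos ds.length with hL0 | hLpos
      · omega
      · have hspec := pv_step1_spec ds (ds.length - 1) (by omega)
          (pv_pairwise_short (by rw [List.length_drop]; omega))
        rw [hi0, h0, List.drop_zero] at hspec
        exact absurd hlt (not_lt.mpr
          (pv_drop_pairwise_getD ds 0 (by simpa using hspec.1) p q (by omega) hpq hql))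
    rw [hnil]
    simp
  -- ======== pivot exists ========
  · rw [if_neg h0]
    have hL1 : 1 ≤ ds.length := by
      by_contra hc
      have hL0 : ds.length = 0 := by omega
      apply h0
      rw [← hi0, hL0]
      rw [ngeStep1, if_neg (by omega)]
    have hi0lt : i0 < ds.length := by omega
    have hi0pos : 0 < i0 := by omega
    have hspec := pv_step1_spec ds (ds.length - 1) (by omega)
      (pv_pairwise_short (by rw [List.length_drop]; omega))
    rw [hi0] at hspec
    obtain ⟨hpw, hriseD0⟩ := hspec
    have hriseD : ds.getD (i0 - 1) ' ' < ds.getD i0 ' ' := hriseD0 hi0pos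
    have hpwD := pv_drop_pairwise_getD ds i0 hpw
    -- ---- loop 2 facts ----
    obtain ⟨hj1, hj2, hgt, hstop⟩ := pv_step2_spec ds i0 i0
      (fun k hk hk' => by omega) (le_of_lt hi0lt)
    generalize hj : ngeStep2 ds i0 i0 = j
    rw [hj] at hj1 hj2 hgt hstop
    have hij : i0 < j := by
      rcases lt_or_eq_of_le hj1 with h | h
      · exact h
      · exfalso
        have hx := hstop (by omega)
        rw [← h] at hx
        exact absurd hriseD (not_lt.mpr hx)
    -- names for the two distinguished digits
    set piv := ds.getD (i0 - 1) ' ' with hpiv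
    set dmin := ds.getD (j - 1) ' ' with hdmin
    -- ---- the swap, decomposed ----
    have hd2 := pv_swap_decomp ds (i0 - 1) (j - 1) (by omega) (by omega)
    rw [show i0 - 1 + 1 = i0 by omega] at hd2
    rw [hd2]
    -- ---- the reversal ----
    set X := (ds.drop i0).set (j - 1 - i0) piv with hXdef
    have hXne : X ≠ [] := by
      apply List.ne_nil_of_length_pos
      rw [hXdef, List.length_set, List.length_drop]
      omega
    rw [pv_rev_decomp _ _ _ hXne i0 (by rw [List.length_take]; omega)]
    -- ---- X written as take ++ piv :: drop ----
    have hsplitj := pv_drop_split ds i0 (j - 1 - i0) (by omega)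
    rw [show i0 + (j - 1 - i0) = j - 1 by omega, show j - 1 + 1 = j by omega] at hsplitj
    have hXeq : X = (ds.drop i0).take (j - 1 - i0) ++ piv :: ds.drop j := by
      rw [hXdef]
      conv_lhs => rw [hsplitj]
      exact pv_set_mid' _ _ _ _ _ (by rw [List.length_take, List.length_drop]; omega)
    -- ---- X.reverse is sorted ascending ----
    have hXrevpw : X.reverse.Pairwise (fun a b => a ≤ b) := by
      rw [List.pairwise_reverse]
      exact pv_T1_pairwise ds i0 j hij hj2 hgt hstop hpwD
    -- ---- the winning candidate equals A's digit string ----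
    have hCstar : pvCand ds (i0 - 1) (j - 1) = ds.take (i0 - 1) ++ dmin :: X.reverse := by
      unfold pvCand
      rw [show i0 - 1 + 1 = i0 by omega, show j - 1 + 1 = j by omega]
      congr 2
      rw [← hXeq]
      exact PySem.List.sorted_id_eq_of_perm_of_pairwise X X.reverse (List.reverse_perm X) hXrevpw
    -- ---- membership and non-emptiness ----
    have hmemC : pvCand ds (i0 - 1) (j - 1) ∈ ngeCandList ds :=
      (pv_mem_cands ds _).mpr ⟨i0 - 1, j - 1, by omega, by omega,
        hgt (j - 1) (by omega) (by omega), rfl⟩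
    have hne : ngeCandList ds ≠ [] := by
      intro h
      rw [h] at hmemC
      exact List.not_mem_nil hmemC
    rw [if_neg hne]
    obtain ⟨m, hmo⟩ : ∃ m, PySem.List.min? (ngeCandList ds) (fun c => c) = some m := by
      cases hc : PySem.List.min? (ngeCandList ds) (fun c => c) with
      | none => exact absurd ((PySem.List.min?_eq_none_iff _ _).mp hc) hne
      | some m => exact ⟨m, rfl⟩
    -- ---- dmin is minimal among suffix digits above the pivot ----
    have hdminmin : ∀ k, i0 ≤ k → k < ds.length → piv < ds.getD k ' ' →
        dmin ≤ ds.getD k ' ' := by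
      intro k hk1 hk2 hk3
      by_cases hkj : k ≤ j - 1
      · rcases lt_or_eq_of_le hkj with h | h
        · exact hpwD k (j - 1) hk1 h (by omega)
        · rw [hdmin, ← h]
      · have hja : ds.getD j ' ' ≤ piv := hstop (by omega)
        rcases lt_or_eq_of_le (show j ≤ k by omega) with h | h
        · exact absurd hk3 (not_lt.mpr (le_trans (hpwD j k (by omega) h hk2) hja))
        · rw [← h] at hk3
          exact absurd hk3 (not_lt.mpr hja)
    -- ---- the winning candidate is the lexicographic minimum ----
    have hmin : ∀ C ∈ ngeCandList ds, pvCand ds (i0 - 1) (j - 1) ≤ C := by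
      intro C hC
      obtain ⟨p, q, hpq, hql, hlt, rfl⟩ := (pv_mem_cands ds C).mp hC
      by_cases hpi : i0 ≤ p
      · exact absurd hlt (not_lt.mpr (hpwD p q hpi hpq hql))
      · by_cases hpe : p = i0 - 1
        · subst hpe
          have hdq : dmin ≤ ds.getD q ' ' := hdminmin q (by omega) hql hlt
          rcases lt_or_eq_of_le hdq with hdlt | hdeq
          · -- decided by the digit placed at position i0 - 1
            refine le_of_lt ?_
            rw [hCstar]
            unfold pvCand
            exact pv_lex_of_prefix _ _ _ _ _ hdlt
          · -- same digit chosen: same multiset, hence the very same candidate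
            have hq1 : i0 ≤ q := by omega
            have hsplitq := pv_drop_split ds i0 (q - i0) (by omega)
            rw [show i0 + (q - i0) = q by omega] at hsplitq
            have heq : pvCand ds (i0 - 1) q = pvCand ds (i0 - 1) (j - 1) := by
              unfold pvCand
              rw [show i0 - 1 + 1 = i0 by omega, show j - 1 + 1 = j by omega]
              congr 1
              congr 1
              · exact hdeq.symm
              · apply PySem.List.sorted_eq_sorted_of_perm _ _ _ (fun a b h => h)
                have eq1 : (ds.drop i0).set (q - i0) piv =
                    (ds.drop i0).take (q - i0) ++ piv :: ds.drop (q + 1) := by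
                  conv_lhs => rw [hsplitq]
                  exact pv_set_mid' _ _ _ _ _ (by rw [List.length_take, List.length_drop]; omega)
                rw [← eq1, ← hXeq]
                have hlq : q - i0 < (ds.drop i0).length := by rw [List.length_drop]; omega
                have hlj : j - 1 - i0 < (ds.drop i0).length := by rw [List.length_drop]; omega
                have hgq : (ds.drop i0)[q - i0] = dmin := by
                  rw [pv_getElem_drop' ds i0 _ hlq, show i0 + (q - i0) = q by omega, hdeq]
                have hgj : (ds.drop i0)[j - 1 - i0] = dmin := by
                  rw [pv_getElem_drop' ds i0 _ hlj, show i0 + (j - 1 - i0) = j - 1 by omega]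
                have p1 := (pv_perm_set (ds.drop i0) (q - i0) piv hlq).trans
                  (List.Perm.cons piv
                    ((pv_eraseIdx_perm_erase (ds.drop i0) (q - i0) hlq).trans (by rw [hgq])))
                have p2 := (pv_perm_set (ds.drop i0) (j - 1 - i0) piv hlj).trans
                  (List.Perm.cons piv
                    ((pv_eraseIdx_perm_erase (ds.drop i0) (j - 1 - i0) hlj).trans (by rw [hgj])))
                exact p1.trans p2.symm
            rw [heq]
        · -- the candidate keeps a shorter prefix: decided at position p
          refine le_of_lt ?_
          rw [hCstar, pv_take_split ds p (i0 - 1) (by omega) (by omega)]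
          unfold pvCand
          rw [List.append_assoc, List.cons_append]
          exact pv_lex_of_prefix _ _ _ _ _ hlt
    have hmo' : (@PySem.List.min? (List Char) (List Char) List.instLinearOrder.toLT
        LinearOrder.toDecidableLT (ngeCandList ds) fun c => c) = some m := by
      have e : (fun (a b : List Char) => a.decidableLT b) =
          @LinearOrder.toDecidableLT _ List.instLinearOrder := Subsingleton.elim _ _
      rw [← e]
      exact hmo
    have hmC : m = pvCand ds (i0 - 1) (j - 1) :=
      le_antisymm (PySem.List.min?_isMin (key := fun c => c) hmo' _ hmemC)
        (hmin m (PySem.List.min?_mem hmo))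
    simp only [hmo, hmC, hCstar]
    rfl

-- ===== VERDICT (by name: the statement is the Claim_ definition above) =====
theorem next_greater_element_3_spec : Claim_equal_next_greater_element_3 := by
  intro n _ _
  unfold Spec_next_greater_element_3 next_greater_element_3 next_greater_element_3_alt
  exact pv_main (PySem.Int.toChars n)
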